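-- pv_equiv track=rewrite | github.com/karanalang/technology | Code/DataStructures/python/leetcode_sort/Py_sortArrayByParity2.py | sortArrayByParityII_2Pass
-- ===== SOURCE A (Python) =====
-- from typing import List
--
-- def sortArrayByParityII_2Pass(A: List[int]) -> List[int]:
--
--     res = [0] * len(A)
--     evenindex = 0
--     oddindex = 1
--     for i in range(len(A)):
--         if (A[i] % 2 == 0):
--             res[evenindex] = A[i]
--             evenindex = evenindex + 2
--         else:
--             res[oddindex] = A[i]
--             oddindex = oddindex + 2
--
--     return res
-- ===== SOURCE B (Python) =====
-- from typing import List
--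
-- def sortArrayByParityII_2Pass(A: List[int]) -> List[int]:
--     evens = [x for x in A if x % 2 == 0]
--     odds = [x for x in A if x % 2 != 0]
--     res = [0] * len(A)
--     for i, x in enumerate(evens):
--         res[2 * i] = x
--     for i, x in enumerate(odds):
--         res[2 * i + 1] = x
--     return res
-- ===== Notes on version B (the rewrite author's own statement) =====
-- stated objective: alternative
-- what changed: Replaces the single interleaved pass carrying two running index counters by a partition-then-scatter structure: first split A into evens and odds, then place evens at positions 2*i and odds at 2*i+1 with two indexed loops.
import Mathlib
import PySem

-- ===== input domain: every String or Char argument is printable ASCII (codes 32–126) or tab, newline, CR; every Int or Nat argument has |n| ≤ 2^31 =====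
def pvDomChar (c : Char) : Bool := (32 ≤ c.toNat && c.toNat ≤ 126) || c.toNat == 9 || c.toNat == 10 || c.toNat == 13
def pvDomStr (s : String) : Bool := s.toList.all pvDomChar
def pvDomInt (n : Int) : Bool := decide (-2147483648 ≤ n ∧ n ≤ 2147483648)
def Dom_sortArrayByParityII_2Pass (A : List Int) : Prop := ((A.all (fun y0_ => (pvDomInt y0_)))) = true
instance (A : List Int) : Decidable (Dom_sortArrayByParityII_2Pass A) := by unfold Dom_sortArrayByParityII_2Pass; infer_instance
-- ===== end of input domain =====

-- B replaces A's single interleaved pass (two running index counters) by partition-then-scatter: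
-- split A into evens and odds, then place evens at 2*i and odds at 2*i+1 (objective: alternative).

-- ===== PORT A =====
-- one loop iteration of A: place A[i] at the current even or odd slot and advance that counter
def pvStepA (s : List Int × Nat × Nat) (x : Int) : List Int × Nat × Nat :=
  if PySem.Int.mod x 2 == 0 then (s.1.set s.2.1 x, s.2.1 + 2, s.2.2)
  else (s.1.set s.2.2 x, s.2.1, s.2.2 + 2)

def sortArrayByParityII_2Pass (A : List Int) : List Int :=
  let res := List.replicate A.length (0 : Int)
  ((PySem.List.pyRange 0 (A.length : Int)).foldl
    (fun s i => pvStepA s (PySem.List.pyGetD A i 0)) (res, 0, 1)).1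

-- ===== PORT B =====
-- 'for i, x in enumerate(evens): res[2*i] = x'
def pvPlaceEven : List Int → Nat → List Int → List Int
  | r, _, [] => r
  | r, i, x :: xs => pvPlaceEven (r.set (2 * i) x) (i + 1) xs

-- 'for i, x in enumerate(odds): res[2*i+1] = x'
def pvPlaceOdd : List Int → Nat → List Int → List Int
  | r, _, [] => r
  | r, i, x :: xs => pvPlaceOdd (r.set (2 * i + 1) x) (i + 1) xs

def sortArrayByParityII_2Pass_alt (A : List Int) : List Int :=
  let evens := A.filter (fun x => PySem.Int.mod x 2 == 0)
  let odds := A.filter (fun x => !(PySem.Int.mod x 2 == 0))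
  pvPlaceOdd (pvPlaceEven (List.replicate A.length (0 : Int)) 0 evens) 0 odds

-- ===== PRECONDITION & SPEC =====
-- Pre_ admits exactly the inputs on which the Python A returns: when the even and odd values
-- cannot fill alternating slots (2*#evens ∉ {n, n+1}), A raises IndexError (and so does B).
def Pre_sortArrayByParityII_2Pass (A : List Int) : Prop :=
  2 * (A.filter (fun x => PySem.Int.mod x 2 == 0)).length = A.length ∨
  2 * (A.filter (fun x => PySem.Int.mod x 2 == 0)).length = A.length + 1

instance (A : List Int) : Decidable (Pre_sortArrayByParityII_2Pass A) := by
  unfold Pre_sortArrayByParityII_2Pass; infer_instance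

def pvWitness_sortArrayByParityII_2Pass : List Int := [3, 2, 1, 4]

def Spec_sortArrayByParityII_2Pass (A : List Int) (out : List Int) : Prop :=
  out = sortArrayByParityII_2Pass_alt A
instance (A : List Int) (out : List Int) : Decidable (Spec_sortArrayByParityII_2Pass A out) := by
  unfold Spec_sortArrayByParityII_2Pass; infer_instance

-- ===== CLAIM (what is proved, stated in full; the proofs are below) =====
def Claim_equal_sortArrayByParityII_2Pass : Prop :=
  ∀ (A : List Int), Dom_sortArrayByParityII_2Pass A → Pre_sortArrayByParityII_2Pass A →
    Spec_sortArrayByParityII_2Pass A (sortArrayByParityII_2Pass A)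

-- ===== LEMMAS AND PROOFS =====

-- scattering evens (always at even positions) commutes with a write at an odd position
theorem pvPlaceEven_set_odd (xs : List Int) :
    ∀ (r : List Int) (e j : Nat) (x : Int),
      pvPlaceEven (r.set (2 * j + 1) x) e xs = (pvPlaceEven r e xs).set (2 * j + 1) x := by
  induction xs with
  | nil => intro r e j x; rfl
  | cons y ys ih =>
      intro r e j x
      show pvPlaceEven ((r.set (2 * j + 1) x).set (2 * e) y) (e + 1) ys
          = (pvPlaceEven (r.set (2 * e) y) (e + 1) ys).set (2 * j + 1) x
      rw [List.set_comm x y (by omega : 2 * j + 1 ≠ 2 * e), ih]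

-- A's loop over the remaining elements, started at counters 2*e and 2*o+1, equals
-- B's scatter of the remaining evens/odds onto the current buffer
theorem foldA_eq (l : List Int) :
    ∀ (r : List Int) (e o : Nat),
      (l.foldl pvStepA (r, 2 * e, 2 * o + 1)).1 =
        pvPlaceOdd (pvPlaceEven r e (l.filter (fun x => PySem.Int.mod x 2 == 0))) o
          (l.filter (fun x => !(PySem.Int.mod x 2 == 0))) := by
  induction l with
  | nil => intro r e o; rfl
  | cons x xs ih =>
      intro r e o
      by_cases h : PySem.Int.mod x 2 == 0
      · have h2 : 2 * e + 2 = 2 * (e + 1) := by omega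
        simp only [List.foldl_cons, pvStepA, h, List.filter_cons, Bool.not_true,
          Bool.false_eq_true, if_neg, not_false_eq_true, if_pos, h2]
        rw [ih]
        rfl
      · have hf : (PySem.Int.mod x 2 == 0) = false := by simpa using h
        have h2 : 2 * o + 1 + 2 = 2 * (o + 1) + 1 := by omega
        simp only [List.foldl_cons, pvStepA, hf, List.filter_cons, Bool.not_false,
          Bool.false_eq_true, if_neg, not_false_eq_true, if_pos, h2]
        rw [ih, pvPlaceOdd, pvPlaceEven_set_odd]

-- ===== VERDICT (by name: the statement is the Claim_ definition above) =====
theorem sortArrayByParityII_2Pass_spec : Claim_equal_sortArrayByParityII_2Pass := by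
  intro A _ _
  unfold Spec_sortArrayByParityII_2Pass
  show ((PySem.List.pyRange 0 (A.length : Int)).foldl
      (fun s i => pvStepA s (PySem.List.pyGetD A i 0)) (List.replicate A.length 0, 0, 1)).1 =
    pvPlaceOdd (pvPlaceEven (List.replicate A.length 0) 0
        (A.filter (fun x => PySem.Int.mod x 2 == 0))) 0
      (A.filter (fun x => !(PySem.Int.mod x 2 == 0)))
  rw [PySem.List.foldl_pyRange_pyGetD' A 0 pvStepA _ (by omega)]
  simpa using foldA_eq A (List.replicate A.length 0) 0 0
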